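-- pv_equiv track=rewrite | github.com/stuart-bradley/code_interview_practice | Recursion_And_Dynamic_Programming.py | bracket_positions
-- ===== SOURCE A (Python) =====
-- def bracket_positions(config):
-- 	stack = []
-- 	positions = []
-- 	for i,bracket in enumerate(config):
-- 		if bracket == "(":
-- 			stack.append(("(",i))
-- 		else:
-- 			start = stack.pop()
-- 			positions.append((start[1],i))
-- 	for i in range(0, len(positions)):
-- 		start, end = positions[i]
-- 		current_end = end
-- 		for j in range(i, len(positions)):
-- 			start_next, end_next = positions[j]
-- 			if start_next == current_end + 1:
-- 				positions.append((start, end_next))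
-- 				current_end = end_next
-- 	return positions
-- ===== SOURCE B (Python) =====
-- def bracket_positions(config):
--     stack = []
--     positions = []
--     for i, bracket in enumerate(config):
--         if bracket == "(":
--             stack.append(("(", i))
--         else:
--             start = stack.pop()
--             positions.append((start[1], i))
--     # Phase 2: instead of repeatedly rescanning the (growing) list, index the
--     # original groups by their start position and follow each chain directly.
--     start_map = {s: (s, e) for s, e in positions}
--     result = list(positions)
--     for s, e in positions:
--         current_end = e
--         while True:
--             nxt = start_map.get(current_end + 1)
--             if nxt is None:
--                 break
--             result.append((s, nxt[1]))
--             current_end = nxt[1]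
--     return result
-- ===== Notes on version B (the rewrite author's own statement) =====
-- stated objective: faster
-- what changed: Phase 2 no longer rescans the growing positions list with a nested index loop; it builds a dict from start-index to group once and follows each adjacency chain directly with a while-loop of O(1) lookups.
import Mathlib
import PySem

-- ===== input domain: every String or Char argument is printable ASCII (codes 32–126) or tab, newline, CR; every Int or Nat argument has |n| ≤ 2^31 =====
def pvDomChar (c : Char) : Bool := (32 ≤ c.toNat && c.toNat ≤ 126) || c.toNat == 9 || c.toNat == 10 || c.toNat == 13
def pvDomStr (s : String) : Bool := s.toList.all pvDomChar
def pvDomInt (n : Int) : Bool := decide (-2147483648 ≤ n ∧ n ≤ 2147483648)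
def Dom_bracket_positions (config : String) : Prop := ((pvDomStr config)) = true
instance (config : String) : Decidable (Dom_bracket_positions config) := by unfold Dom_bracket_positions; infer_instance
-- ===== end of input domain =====

-- B replaces A's quadratic rescans of the growing positions list by a start-index
-- dictionary and direct chain-following (objective: faster).


-- ===== PORT A =====
-- Phase 1: `for i,bracket in enumerate(config): …`; `stack.pop()` on an empty stack
-- raises IndexError in Python = `none` here (excluded by Pre_).
def bpScanA : List (Int × Char) → List (String × Int) × List (Int × Int) →
    Option (List (String × Int) × List (Int × Int))
  | [], st => some st
  | (i, c) :: rest, (stack, positions) =>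
    if c = '(' then bpScanA rest (stack ++ [("(", i)], positions)
    else
      match PySem.List.pop? stack with
      | none => none
      | some (start, stack') => bpScanA rest (stack', positions ++ [(start.2, i)])

-- inner loop `for j in range(i, len(positions))`: `m` is len(positions) frozen at loop
-- entry; the list keeps growing by appends.  `positions[j]`: j < m ≤ length always
-- holds in Python, so the getD default is never read.
def bpInnerA (s : Int) (m : Nat) : Nat → Int → List (Int × Int) → List (Int × Int)
  | j, ce, ps =>
    if j < m then
      let q := ps.getD j (0, 0)
      if q.1 = ce + 1 then bpInnerA s m (j + 1) q.2 (ps ++ [(s, q.2)])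
      else bpInnerA s m (j + 1) ce ps
    else ps
  termination_by j _ _ => m - j

-- outer loop `for i in range(0, len(positions))`: n0 is the original length.
def bpOuterA (n0 : Nat) : Nat → List (Int × Int) → List (Int × Int)
  | i, ps =>
    if i < n0 then
      let p := ps.getD i (0, 0)
      bpOuterA n0 (i + 1) (bpInnerA p.1 ps.length i p.2 ps)
    else ps
  termination_by i _ => n0 - i

def bracket_positions (config : String) : List (Int × Int) :=
  match bpScanA (PySem.List.enumerate config.toList) ([], []) with
  | none => []   -- Python raises IndexError here; outside Pre_
  | some (_, positions) => bpOuterA positions.length 0 positions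

-- ===== PORT B =====
-- Phase 1 of Source B (same Python code as A's phase 1), as an Option-monadic fold.
def bpStepB (st : List (String × Int) × List (Int × Int)) (p : Int × Char) :
    Option (List (String × Int) × List (Int × Int)) :=
  if p.2 = '(' then some (st.1 ++ [("(", p.1)], st.2)
  else (PySem.List.pop? st.1).map (fun r => (r.2, st.2 ++ [(r.1.2, p.1)]))

-- `start_map = {s: (s, e) for s, e in positions}`
def bpStartMap (positions : List (Int × Int)) : PySem.Dict Int (Int × Int) :=
  positions.foldl (fun d q => d.insert q.1 q) PySem.Dict.empty

-- the `while True` chain walk; fuel (length positions + 1) is a Lean-only termination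
-- bound: each successful lookup strictly increases current_end, so at most
-- length positions lookups succeed and the walk always breaks within the fuel.
def bpChainB (sm : PySem.Dict Int (Int × Int)) (s : Int) : Nat → Int → List (Int × Int)
  | 0, _ => []
  | fuel + 1, ce =>
    match sm.get? (ce + 1) with
    | none => []
    | some nxt => (s, nxt.2) :: bpChainB sm s fuel nxt.2

def bracket_positions_alt (config : String) : List (Int × Int) :=
  match (PySem.List.enumerate config.toList).foldlM bpStepB ([], []) with
  | none => []   -- Python raises IndexError here; outside Pre_
  | some (_, positions) =>
    let sm := bpStartMap positions
    positions.foldl (fun out p => out ++ bpChainB sm p.1 (positions.length + 1) p.2)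
      positions

-- ===== PRECONDITION & SPEC =====
-- Pre_: exactly the inputs where Python A returns: every character that is not an
-- opening bracket must find a non-empty stack, i.e. strictly more openers than other
-- characters before it (else stack.pop() raises IndexError).
def Pre_bracket_positions (config : String) : Prop :=
  ∀ k : Nat, k < config.toList.length → config.toList.getD k ' ' ≠ '(' →
    (config.toList.take k).countP (· == '(') > (config.toList.take k).countP (· != '(')
instance (config : String) : Decidable (Pre_bracket_positions config) := by
  unfold Pre_bracket_positions; infer_instance

def pvWitness_bracket_positions : String := "(())()"

def Spec_bracket_positions (config : String) (out : List (Int × Int)) : Prop :=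
  out = bracket_positions_alt config
instance (config : String) (out : List (Int × Int)) : Decidable (Spec_bracket_positions config out) := by
  unfold Spec_bracket_positions; infer_instance

-- ===== CLAIM (what is proved, stated in full; the proofs are below) =====
def Claim_equal_bracket_positions : Prop := ∀ (config : String), Dom_bracket_positions config → Pre_bracket_positions config → Spec_bracket_positions config (bracket_positions config)

-- ===== LEMMAS AND PROOFS =====

-- ---- phase 1: A's recursion = B's Option-monadic fold ----
theorem bpScan_eq (l : List (Int × Char)) :
    ∀ st : List (String × Int) × List (Int × Int),
      bpScanA l st = l.foldlM bpStepB st := by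
  induction l with
  | nil => intro st; rfl
  | cons p rest ih =>
    intro ⟨stack, positions⟩
    simp only [bpScanA, List.foldlM, bpStepB]
    by_cases h : p.2 = '('
    · simp [h, ih]
    · simp only [h, if_false]
      cases hp : PySem.List.pop? stack with
      | none => simp
      | some r => simp [ih]

-- `stack.pop()` on a non-empty list pops the last element
theorem pop?_ne_nil {α : Type} (xs : List α) (h : xs ≠ []) :
    ∃ ys y, xs = ys ++ [y] ∧ PySem.List.pop? xs = some (y, ys) := by
  rcases List.eq_nil_or_concat xs with rfl | ⟨ys, y, rfl⟩
  · exact absurd rfl h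
  · exact ⟨ys, y, by simp, by rw [List.concat_eq_append]; exact PySem.List.pop?_last ys y⟩


-- ---- phase 1 succeeds under the counting condition ----
theorem bpScanA_isSome :
    ∀ (cs : List Char) (i : Int) (stack : List (String × Int)) (P : List (Int × Int)),
      (∀ k : Nat, k < cs.length → cs.getD k ' ' ≠ '(' →
        (cs.take k).countP (· == '(') + stack.length > (cs.take k).countP (· != '(')) →
      (bpScanA (PySem.List.enumerate cs i) (stack, P)).isSome := by
  intro cs
  induction cs with
  | nil => intro i stack P _; simp [PySem.List.enumerate, bpScanA]
  | cons c rest ih =>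
    intro i stack P h
    rw [PySem.List.enumerate_cons]
    by_cases hc : c = '('
    · simp only [bpScanA, if_pos hc]
      apply ih
      intro k hk hne
      have := h (k + 1) (by simpa using hk) (by simpa using hne)
      simp only [List.take_succ_cons, List.countP_cons, hc] at this
      simp at this ⊢
      omega
    · simp only [bpScanA, if_neg hc]
      have hlen : stack.length > 0 := by
        have := h 0 (by simp) (by simpa using hc)
        simpa using this
      obtain ⟨ys, y, rfl, hpop⟩ := pop?_ne_nil stack (by intro he; simp [he] at hlen)
      rw [hpop]
      apply ih
      intro k hk hne
      have := h (k + 1) (by simpa using hk) (by simpa using hne)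
      simp only [List.take_succ_cons, List.countP_cons] at this
      have hcf : (c == '(') = false := by simpa using hc
      have hct : (c != '(') = true := by simpa using hc
      simp [hcf, hct] at this
      simp
      omega

-- ---- phase 1 invariant: the matched groups are well-shaped ----
def bpInv (i : Int) (stack : List (String × Int)) (P : List (Int × Int)) : Prop :=
  (∀ x ∈ stack, x.2 < i) ∧ (∀ q ∈ P, q.1 < q.2 ∧ q.2 < i) ∧
    (P.map Prod.snd).Pairwise (· < ·) ∧ (stack.map Prod.snd ++ P.map Prod.fst).Nodup

theorem bpScanA_inv :
    ∀ (cs : List Char) (i : Int) (stack : List (String × Int)) (P : List (Int × Int))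
      (st' : List (String × Int)) (P' : List (Int × Int)),
      bpInv i stack P → bpScanA (PySem.List.enumerate cs i) (stack, P) = some (st', P') →
      (∀ q ∈ P', q.1 < q.2) ∧ (P'.map Prod.snd).Pairwise (· < ·) ∧
        (P'.map Prod.fst).Nodup := by
  intro cs
  induction cs with
  | nil =>
    intro i stack P st' P' hinv heq
    simp [PySem.List.enumerate, bpScanA] at heq
    obtain ⟨-, rfl⟩ := heq
    obtain ⟨-, h2, h3, h4⟩ := hinv
    exact ⟨fun q hq => (h2 q hq).1, h3, h4.of_append_right⟩
  | cons c rest ih =>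
    intro i stack P st' P' hinv heq
    obtain ⟨h1, h2, h3, h4⟩ := hinv
    rw [PySem.List.enumerate_cons] at heq
    by_cases hc : c = '('
    · simp only [bpScanA, if_pos hc] at heq
      refine ih (i + 1) _ _ st' P' ⟨?_, ?_, h3, ?_⟩ heq
      · intro x hx
        rcases List.mem_append.1 hx with hx | hx
        · have := h1 x hx; omega
        · simp at hx; subst hx; omega
      · intro q hq; have := h2 q hq; omega
      · have hperm : ((stack ++ [("(", i)]).map Prod.snd ++ P.map Prod.fst).Nodup ↔
            (i :: (stack.map Prod.snd ++ P.map Prod.fst)).Nodup := by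
          simp only [List.map_append, List.map_cons, List.map_nil, List.append_assoc,
            List.cons_append, List.nil_append]
          exact List.nodup_middle
        rw [hperm, List.nodup_cons]
        refine ⟨?_, h4⟩
        intro hmem
        rcases List.mem_append.1 hmem with hm | hm
        · obtain ⟨x, hx, hx2⟩ := List.mem_map.1 hm
          have := h1 x hx; omega
        · obtain ⟨q, hq, hq2⟩ := List.mem_map.1 hm
          have := h2 q hq; omega
    · simp only [bpScanA, if_neg hc] at heq
      rcases List.eq_nil_or_concat stack with rfl | ⟨ys, y, rfl⟩
      · simp [PySem.List.pop?] at heq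
      · rw [List.concat_eq_append] at heq
        simp only [List.concat_eq_append] at h1 h4
        rw [PySem.List.pop?_last] at heq
        refine ih (i + 1) _ _ st' P' ⟨?_, ?_, ?_, ?_⟩ heq
        · intro x hx; have := h1 x (by simp [hx]); omega
        · intro q hq
          rcases List.mem_append.1 hq with hq | hq
          · have := h2 q hq; omega
          · simp at hq; subst hq
            have := h1 y (by simp); constructor <;> simp <;> omega
        · simp only [List.map_append, List.map_cons, List.map_nil]
          rw [List.pairwise_append]
          refine ⟨h3, by simp, ?_⟩
          intro a ha b hb
          simp at hb; subst hb
          obtain ⟨q, hq, rfl⟩ := List.mem_map.1 ha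
          exact (h2 q hq).2
        · have e1 : ((ys ++ [y]).map Prod.snd ++ P.map Prod.fst).Nodup ↔
              (y.2 :: (ys.map Prod.snd ++ P.map Prod.fst)).Nodup := by
            simp only [List.map_append, List.map_cons, List.map_nil, List.append_assoc,
              List.cons_append, List.nil_append]
            exact List.nodup_middle
          have e2 : (ys.map Prod.snd ++ (P ++ [(y.2, i)]).map Prod.fst).Nodup ↔
              (y.2 :: (ys.map Prod.snd ++ P.map Prod.fst)).Nodup := by
            simp only [List.map_append, List.map_cons, List.map_nil, ← List.append_assoc]
            exact (List.perm_append_singleton _ _).nodup_iff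
          rw [e2, ← e1]
          exact h4
-- ---- phase 2, A side: one inner pass, abstracted ----
-- what A's inner scan over a fixed list emits, together with the final current_end
def bpScanEmit (s : Int) : List (Int × Int) → Int → List (Int × Int) × Int
  | [], ce => ([], ce)
  | q :: rest, ce =>
    if q.1 = ce + 1 then
      let r := bpScanEmit s rest q.2
      ((s, q.2) :: r.1, r.2)
    else bpScanEmit s rest ce

theorem bpScanEmit_append (s : Int) (X Y : List (Int × Int)) : ∀ ce : Int,
    bpScanEmit s (X ++ Y) ce =
      ((bpScanEmit s X ce).1 ++ (bpScanEmit s Y (bpScanEmit s X ce).2).1,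
        (bpScanEmit s Y (bpScanEmit s X ce).2).2) := by
  induction X with
  | nil => intro ce; simp [bpScanEmit]
  | cons q rest ih =>
    intro ce
    by_cases h : q.1 = ce + 1 <;> simp [bpScanEmit, h, ih]

theorem bpScanEmit_nomatch (s : Int) : ∀ (M : List (Int × Int)) (ce : Int),
    (∀ q ∈ M, q.1 ≤ ce) → bpScanEmit s M ce = ([], ce) := by
  intro M
  induction M with
  | nil => intro ce _; rfl
  | cons q rest ih =>
    intro ce h
    have hq : q.1 ≠ ce + 1 := by have := h q (by simp); omega
    simp [bpScanEmit, hq, ih ce (fun r hr => h r (by simp [hr]))]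

theorem bpScanEmit_le (s : Int) : ∀ (X : List (Int × Int)) (ce : Int),
    (∀ q ∈ X, q.1 < q.2) → ce ≤ (bpScanEmit s X ce).2 := by
  intro X
  induction X with
  | nil => intro ce _; simp [bpScanEmit]
  | cons q rest ih =>
    intro ce h
    by_cases hq : q.1 = ce + 1
    · simp only [bpScanEmit, if_pos hq]
      have h1 : q.1 < q.2 := h q (by simp)
      have := ih q.2 (fun r hr => h r (by simp [hr]))
      omega
    · simp only [bpScanEmit, if_neg hq]
      exact ih ce (fun r hr => h r (by simp [hr]))

theorem bpScanEmit_fst (s : Int) : ∀ (X : List (Int × Int)) (ce : Int),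
    ∀ r ∈ (bpScanEmit s X ce).1, r.1 = s := by
  intro X
  induction X with
  | nil => intro ce r hr; simp [bpScanEmit] at hr
  | cons q rest ih =>
    intro ce r hr
    by_cases hq : q.1 = ce + 1
    · simp only [bpScanEmit, if_pos hq, List.mem_cons] at hr
      rcases hr with rfl | hr
      · rfl
      · exact ih q.2 r hr
    · simp only [bpScanEmit, if_neg hq] at hr
      exact ih ce r hr

theorem bpInnerA_eq (s : Int) (R : List (Int × Int)) :
    ∀ (j : Nat) (ce : Int) (acc : List (Int × Int)), j ≤ R.length →
      bpInnerA s R.length j ce (R ++ acc) =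
        R ++ acc ++ (bpScanEmit s (R.drop j) ce).1 := by
  intro j
  induction hn : R.length - j generalizing j with
  | zero =>
    intro ce acc hj
    have hj' : j = R.length := by omega
    subst hj'
    rw [bpInnerA]
    simp [bpScanEmit]
  | succ n ihn =>
    intro ce acc hj
    have hjlt : j < R.length := by omega
    rw [bpInnerA]
    simp only [if_pos hjlt]
    have hget : (R ++ acc).getD j (0, 0) = R[j] := by
      rw [List.getD_append _ _ _ _ hjlt, List.getD_eq_getElem _ _ hjlt]
    have hdrop : R.drop j = R[j] :: R.drop (j + 1) := List.drop_eq_getElem_cons hjlt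
    rw [hget, hdrop]
    by_cases hq : (R[j]).1 = ce + 1
    · simp only [if_pos hq, bpScanEmit]
      rw [show R ++ acc ++ [(s, (R[j]).2)] = R ++ (acc ++ [(s, (R[j]).2)]) from by
        simp [List.append_assoc]]
      rw [ihn (j + 1) (by omega) _ _ (by omega)]
      simp [hq]
    · simp only [if_neg hq, bpScanEmit]
      rw [ihn (j + 1) (by omega) _ _ (by omega)]


def bpWalk (P : List (Int × Int)) (s : Int) : Nat → Int → List (Int × Int)
  | 0, _ => []
  | fuel + 1, ce =>
    match P.find? (fun q => q.1 == ce + 1) with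
    | none => []
    | some q => (s, q.2) :: bpWalk P s fuel q.2

theorem bpBuild_get?_skip :
    ∀ (l : List (Int × Int)) (d : PySem.Dict Int (Int × Int)) (v : Int),
      (∀ r ∈ l, r.1 ≠ v) →
      (l.foldl (fun d q => d.insert q.1 q) d).get? v = d.get? v := by
  intro l
  induction l with
  | nil => intro d v _; rfl
  | cons q rest ih =>
    intro d v h
    simp only [List.foldl_cons]
    rw [ih _ v (fun r hr => h r (by simp [hr]))]
    exact PySem.Dict.get?_insert_of_ne d q (fun hv => h q (by simp) hv.symm)

theorem bpBuild_get? :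
    ∀ (P : List (Int × Int)) (d : PySem.Dict Int (Int × Int)) (v : Int),
      (P.map Prod.fst).Nodup →
      (P.foldl (fun d q => d.insert q.1 q) d).get? v =
        (P.find? (fun q => q.1 == v)).elim (d.get? v) some := by
  intro P
  induction P with
  | nil => intro d v _; rfl
  | cons q rest ih =>
    intro d v hnd
    simp only [List.map_cons, List.nodup_cons] at hnd
    simp only [List.foldl_cons]
    by_cases hv : q.1 = v
    · have hskip : ∀ r ∈ rest, r.1 ≠ v := by
        intro r hr
        intro he
        exact hnd.1 (by rw [← hv, ← he] at *; exact List.mem_map_of_mem hr)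
      rw [bpBuild_get?_skip rest _ v hskip]
      rw [List.find?_cons_of_pos (by simp [hv])]
      subst hv
      simp [PySem.Dict.get?_insert_self]
    · rw [List.find?_cons_of_neg (by simp [hv])]
      rw [ih _ v hnd.2]
      rw [PySem.Dict.get?_insert_of_ne d q (fun he => hv he.symm)]

theorem bpStartMap_get? (P : List (Int × Int)) (h : (P.map Prod.fst).Nodup) (v : Int) :
    (bpStartMap P).get? v = P.find? (fun q => q.1 == v) := by
  rw [bpStartMap, bpBuild_get? P _ v h]
  cases P.find? (fun q => q.1 == v) <;> simp [PySem.Dict.get?_empty]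

theorem bpChainB_eq_walk (P : List (Int × Int)) (h : (P.map Prod.fst).Nodup) (s : Int) :
    ∀ (fuel : Nat) (ce : Int),
      bpChainB (bpStartMap P) s fuel ce = bpWalk P s fuel ce := by
  intro fuel
  induction fuel with
  | zero => intro ce; rfl
  | succ f ih =>
    intro ce
    simp only [bpChainB, bpWalk, bpStartMap_get? P h (ce + 1)]
    cases P.find? (fun q => q.1 == ce + 1) with
    | none => rfl
    | some q => simp [ih]


-- ---- the heart: A's forward scan = B's chain walk ----
theorem bpScan_eq_walk (s : Int) :
    ∀ (V U : List (Int × Int)) (ce : Int) (fuel : Nat),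
      (∀ q ∈ U ++ V, q.1 < q.2) →
      ((U ++ V).map Prod.snd).Pairwise (· < ·) →
      (∀ r ∈ U, r.1 ≠ ce + 1) →
      V.length < fuel →
      (bpScanEmit s V ce).1 = bpWalk (U ++ V) s fuel ce := by
  intro V
  induction V with
  | nil =>
    intro U ce fuel _ _ hU hfuel
    obtain ⟨f, rfl⟩ : ∃ f, fuel = f + 1 := ⟨fuel - 1, by omega⟩
    rw [bpWalk]
    have : (U ++ []).find? (fun q : Int × Int => q.1 == ce + 1) = none := by
      rw [List.find?_eq_none]
      intro x hx
      simp only [List.append_nil] at hx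
      simpa using hU x hx
    rw [this]
    rfl
  | cons q V' ih =>
    intro U ce fuel hlt hpw hU hfuel
    obtain ⟨f, rfl⟩ : ∃ f, fuel = f + 1 := ⟨fuel - 1, by omega⟩
    have hUnone : U.find? (fun q : Int × Int => q.1 == ce + 1) = none := by
      rw [List.find?_eq_none]; intro x hx; simpa using hU x hx
    by_cases hq : q.1 = ce + 1
    · rw [bpWalk]
      have hfind : (U ++ q :: V').find? (fun r => r.1 == ce + 1) = some q := by
        rw [List.find?_append, hUnone, List.find?_cons_of_pos (by simp [hq])]
        rfl
      rw [hfind]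
      simp only [bpScanEmit, if_pos hq]
      have hq2 : q.1 < q.2 := hlt q (by simp)
      have hrw : U ++ q :: V' = (U ++ [q]) ++ V' := by simp
      rw [hrw]
      have hside : ∀ r ∈ U ++ [q], r.1 ≠ q.2 + 1 := by
        intro r hr
        rcases List.mem_append.1 hr with hr | hr
        · have hr1 : r.1 < r.2 := hlt r (by simp [hr])
          have hr2 : r.2 < q.2 := by
            rw [List.map_append, List.pairwise_append] at hpw
            exact hpw.2.2 r.2 (List.mem_map_of_mem hr) q.2 (by simp)
          omega
        · simp at hr; subst hr; omega
      rw [← ih (U ++ [q]) q.2 f (by rw [← hrw]; exact hlt) (by rw [← hrw]; exact hpw)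
        hside (by simpa using hfuel)]
    · simp only [bpScanEmit, if_neg hq]
      have hrw : U ++ q :: V' = (U ++ [q]) ++ V' := by simp
      have hside : ∀ r ∈ U ++ [q], r.1 ≠ ce + 1 := by
        intro r hr
        rcases List.mem_append.1 hr with hr | hr
        · exact hU r hr
        · simp at hr; subst hr; exact hq
      rw [hrw]
      exact ih (U ++ [q]) ce (f + 1) (by rw [← hrw]; exact hlt) (by rw [← hrw]; exact hpw)
        hside (by simp at hfuel ⊢; omega)


-- ---- the outer loop ----
theorem bpOuterA_eq (P : List (Int × Int)) (hlt : ∀ q ∈ P, q.1 < q.2)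
    (hpw : (P.map Prod.snd).Pairwise (· < ·)) :
    ∀ (n : Nat) (i : Nat) (M : List (Int × Int)), n = P.length - i → i ≤ P.length →
      (∀ q ∈ M, ∃ k, ∃ hk : k < P.length, k < i ∧ q.1 = (P[k]).1) →
      bpOuterA P.length i (P ++ M) =
        (P ++ M) ++ (P.drop i).flatMap (fun p => bpWalk P p.1 (P.length + 1) p.2) := by
  intro n
  induction n with
  | zero =>
    intro i M hn hi _
    have : i = P.length := by omega
    subst this
    rw [bpOuterA]
    simp
  | succ n ihn =>
    intro i M hn hi hM
    have hilt : i < P.length := by omega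
    rw [bpOuterA]
    simp only [if_pos hilt]
    have hget : (P ++ M).getD i (0, 0) = P[i] := by
      rw [List.getD_append _ _ _ _ hilt, List.getD_eq_getElem _ _ hilt]
    rw [hget]
    -- the inner pass
    have hinner := bpInnerA_eq (P[i]).1 (P ++ M) i (P[i]).2 [] (by
      simp [List.length_append]; omega)
    rw [List.append_nil] at hinner
    have hlenPM : (P ++ M).length = P.length + M.length := List.length_append
    have hdropPM : (P ++ M).drop i = P.drop i ++ M :=
      List.drop_append_of_le_length (by omega)
    -- scanning the merged tail M changes nothing
    have hMle : ∀ q ∈ M, q.1 ≤ (bpScanEmit (P[i]).1 (P.drop i) (P[i]).2).2 := by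
      intro q hq
      obtain ⟨k, hk, hki, hq1⟩ := hM q hq
      have h1 : (P[k]).1 < (P[k]).2 := hlt _ (List.getElem_mem hk)
      have h2 : (P[k]).2 < (P[i]).2 := by
        rw [List.pairwise_iff_getElem] at hpw
        have := hpw k i (by simpa using hk) (by simpa using hilt) hki
        simpa using this
      have h3 : (P[i]).2 ≤ (bpScanEmit (P[i]).1 (P.drop i) (P[i]).2).2 :=
        bpScanEmit_le _ _ _ (fun r hr => hlt r (List.mem_of_mem_drop hr))
      omega
    have hemit : (bpScanEmit (P[i]).1 ((P ++ M).drop i) (P[i]).2).1 =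
        (bpScanEmit (P[i]).1 (P.drop i) (P[i]).2).1 := by
      rw [hdropPM, bpScanEmit_append,
        bpScanEmit_nomatch _ M _ hMle]
      simp
    -- the emitted chain equals B's walk
    have hwalk : (bpScanEmit (P[i]).1 (P.drop i) (P[i]).2).1 =
        bpWalk P (P[i]).1 (P.length + 1) (P[i]).2 := by
      have htd : P.take i ++ P.drop i = P := List.take_append_drop i P
      have hdc : P.drop i = P[i] :: P.drop (i + 1) := List.drop_eq_getElem_cons hilt
      have hside : ∀ r ∈ P.take i, r.1 ≠ (P[i]).2 + 1 := by
        intro r hr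
        have hr1 : r.1 < r.2 := hlt r (List.mem_of_mem_take hr)
        have hr2 : r.2 < (P[i]).2 := by
          obtain ⟨k, hk, rfl⟩ := List.mem_take_iff_getElem.1 hr
          rw [List.pairwise_iff_getElem] at hpw
          have := hpw k i (by simp at hk ⊢; omega) (by simpa using hilt) (by simp at hk; omega)
          simpa using this
        omega
      have := bpScan_eq_walk (P[i]).1 (P.drop i) (P.take i) (P[i]).2 (P.length + 1)
        (by rw [htd]; exact hlt) (by rw [htd]; exact hpw) hside
        (by have := List.length_drop (l := P) (i := i); omega)
      rw [htd] at this
      exact this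
    rw [hinner, hemit, hwalk]
    -- fold in the new merged pairs and recurse
    have hM' : ∀ q ∈ M ++ bpWalk P (P[i]).1 (P.length + 1) (P[i]).2,
        ∃ k, ∃ hk : k < P.length, k < i + 1 ∧ q.1 = (P[k]).1 := by
      intro q hq
      rcases List.mem_append.1 hq with hq | hq
      · obtain ⟨k, hk, hki, hq1⟩ := hM q hq
        exact ⟨k, hk, by omega, hq1⟩
      · refine ⟨i, hilt, by omega, ?_⟩
        rw [← hwalk] at hq
        exact bpScanEmit_fst _ _ _ q hq
    have hrec := ihn (i + 1) (M ++ bpWalk P (P[i]).1 (P.length + 1) (P[i]).2)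
      (by omega) (by omega) hM'
    rw [show P ++ M ++ bpWalk P (P[i]).1 (P.length + 1) (P[i]).2 =
        P ++ (M ++ bpWalk P (P[i]).1 (P.length + 1) (P[i]).2) from by simp]
    rw [hrec]
    have hdc : P.drop i = P[i] :: P.drop (i + 1) := List.drop_eq_getElem_cons hilt
    rw [hdc, List.flatMap_cons]
    simp

-- ===== VERDICT (by name: the statement is the Claim_ definition above) =====
theorem bracket_positions_spec : Claim_equal_bracket_positions := by
  intro config _ hpre
  unfold Spec_bracket_positions bracket_positions bracket_positions_alt
  rw [← bpScan_eq]
  have hsome := bpScanA_isSome config.toList 0 [] []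
    (by intro k hk hne; simpa using hpre k hk hne)
  cases hscan : bpScanA (PySem.List.enumerate config.toList) ([], []) with
  | none => simp [hscan] at hsome
  | some st =>
    obtain ⟨st', P⟩ := st
    dsimp only
    obtain ⟨hlt, hpw, hnd⟩ := bpScanA_inv config.toList 0 [] [] st' P
      (by refine ⟨by simp, by simp, by simp, by simp⟩) hscan
    have hA := bpOuterA_eq P hlt hpw (P.length - 0) 0 [] rfl (by omega) (by simp)
    simp only [List.append_nil, List.drop_zero] at hA
    rw [hA, PySem.List.foldl_append_eq_flatMap]
    have : (fun p : Int × Int => bpChainB (bpStartMap P) p.1 (P.length + 1) p.2) =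
        (fun p : Int × Int => bpWalk P p.1 (P.length + 1) p.2) := by
      funext p; exact bpChainB_eq_walk P hnd p.1 (P.length + 1) p.2
    rw [this]
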